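-- pv_equiv track=rewrite | github.com/shakeebanwar/Graph-ql--Api | myapp/views.py | queryParameter
-- ===== SOURCE A (Python) =====
-- def queryParameter(query):
--   count = 0
--   queryPattern = ['id','title', 'author', 'year_published', 'review', 'Super_Admin_Id']
--   for j in queryPattern:
--
--       for k in query:
--         if j == k:
--           count = count + 1
--
--
--   if count == len(query):
--     return True
--
--   else:
--       return False
-- ===== SOURCE B (Python) =====
-- def queryParameter(query):
--   queryPattern = ['id','title', 'author', 'year_published', 'review', 'Super_Admin_Id']
--   return all(k in queryPattern for k in query)
-- ===== Notes on version B (the rewrite author's own statement) =====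
-- stated objective: idiomatic
-- what changed: Replaced the nested loops accumulating a match count compared against len(query) with a single short-circuiting all() membership pass over query.
import Mathlib
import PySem

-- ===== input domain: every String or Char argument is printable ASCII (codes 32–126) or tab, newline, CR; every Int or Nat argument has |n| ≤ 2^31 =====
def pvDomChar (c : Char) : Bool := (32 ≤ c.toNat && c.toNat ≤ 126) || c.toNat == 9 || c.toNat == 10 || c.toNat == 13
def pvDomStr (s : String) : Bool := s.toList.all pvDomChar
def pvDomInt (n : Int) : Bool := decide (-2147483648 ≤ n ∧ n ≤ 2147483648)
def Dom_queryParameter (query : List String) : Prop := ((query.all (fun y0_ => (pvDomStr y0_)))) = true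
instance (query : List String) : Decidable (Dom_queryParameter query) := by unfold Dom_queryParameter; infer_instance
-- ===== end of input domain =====

-- B replaces A's nested count-and-compare loops with a single all()-membership pass (idiomatic).

-- ===== PORT A =====
def queryParameter (query : List String) : Bool :=
  let queryPattern : List String := ["id", "title", "author", "year_published", "review", "Super_Admin_Id"]
  let count : Nat :=
    queryPattern.foldl (fun c j => query.foldl (fun c k => if j == k then c + 1 else c) c) 0
  if count == query.length then true else false

-- ===== PORT B =====
def queryParameter_alt (query : List String) : Bool :=
  let queryPattern : List String := ["id", "title", "author", "year_published", "review", "Super_Admin_Id"]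
  query.all (fun k => queryPattern.contains k)

-- ===== PRECONDITION & SPEC =====
def Spec_queryParameter (query : List String) (out : Bool) : Prop := out = queryParameter_alt query
instance (query : List String) (out : Bool) : Decidable (Spec_queryParameter query out) := by unfold Spec_queryParameter; infer_instance

-- ===== CLAIM (what is proved, stated in full; the proofs are below) =====
def Claim_equal_queryParameter : Prop := ∀ (query : List String), Dom_queryParameter query → Spec_queryParameter query (queryParameter query)

-- ===== LEMMAS AND PROOFS =====

-- the inner loop of A counts occurrences of j in q on top of the accumulator
theorem pv_inner (j : String) (q : List String) (c : Nat) :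
    q.foldl (fun c k => if j == k then c + 1 else c) c = c + q.count j := by
  induction q generalizing c with
  | nil => simp
  | cons x t ih =>
    simp only [List.foldl_cons, List.count_cons, ih]
    by_cases h : j = x
    · subst h; simp; omega
    · simp [h, Ne.symm h]

-- the sum of the six occurrence counts accumulated by A's outer loop
def pvS (q : List String) : Nat :=
  q.count "id" + q.count "title" + q.count "author" + q.count "year_published" +
    q.count "review" + q.count "Super_Admin_Id"

theorem pvS_cons (x : String) (t : List String) :
    pvS (x :: t) = pvS t +
      (if (["id", "title", "author", "year_published", "review",
            "Super_Admin_Id"] : List String).contains x then 1 else 0) := by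
  by_cases hx : x ∈ (["id", "title", "author", "year_published", "review",
      "Super_Admin_Id"] : List String)
  · fin_cases hx <;> simp [pvS] <;> omega
  · simp only [List.mem_cons, List.not_mem_nil, or_false, not_or] at hx
    obtain ⟨h1, h2, h3, h4, h5, h6⟩ := hx
    simp [pvS, List.contains_eq_mem, h1, h2, h3, h4, h5, h6]

theorem pvS_le (q : List String) : pvS q ≤ q.length := by
  induction q with
  | nil => simp [pvS]
  | cons x t ih => rw [pvS_cons]; simp only [List.length_cons]; split <;> omega

theorem pvS_spec (q : List String) :
    pvS q = q.length ↔
      q.all (fun k => (["id", "title", "author", "year_published", "review",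
        "Super_Admin_Id"] : List String).contains k) = true := by
  induction q with
  | nil => simp [pvS]
  | cons x t ih =>
    have hle := pvS_le t
    rw [pvS_cons, List.all_cons, Bool.and_eq_true]
    by_cases hx : (["id", "title", "author", "year_published", "review",
        "Super_Admin_Id"] : List String).contains x = true
    · rw [if_pos hx]
      simp only [hx, true_and, List.length_cons]
      rw [← ih]; omega
    · rw [if_neg hx]
      simp only [List.length_cons]
      exact iff_of_false (by omega) (fun hc => hx hc.1)

-- ===== VERDICT (by name: the statement is the Claim_ definition above) =====
theorem queryParameter_spec : Claim_equal_queryParameter := by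
  intro query _
  unfold Spec_queryParameter queryParameter queryParameter_alt
  simp only [List.foldl_cons, List.foldl_nil, pv_inner, Nat.zero_add]
  have hS : query.count "id" + query.count "title" + query.count "author" +
      query.count "year_published" + query.count "review" +
      query.count "Super_Admin_Id" = pvS query := rfl
  rw [hS]
  by_cases hq : pvS query = query.length
  · rw [if_pos (by simpa using hq)]
    exact ((pvS_spec query).mp hq).symm
  · rw [if_neg (fun h => hq (by simpa using h))]
    exact (Bool.eq_false_iff.mpr fun hc => hq ((pvS_spec query).mpr hc)).symm
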